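-- pv_equiv track=rewrite | github.com/shunya-tanaka-512/AtCoder | typical90j/typical90j.py | get_score_totals
-- ===== SOURCE A (Python) =====
-- def get_score_totals(n: int, classes_and_scores: list, q: int, id_nums: list) -> list:
--     l_id_nums = [a[0] - 1 for a in id_nums]
--     r_id_nums = [b[1] for b in id_nums]
--     classes = [c[0] for c in classes_and_scores]
--     scores = [d[1] for d in classes_and_scores]
--     score_totals = []
--
--     accumulations = [[0, 0]]  # 0のインデックス追加
--     accumulation_1 = 0
--     accumulation_2 = 0
--     for i in range(n):
--         if classes[i] == 1:
--             accumulation_1 += scores[i]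
--         else:
--             accumulation_2 += scores[i]
--         accumulations.append([accumulation_1, accumulation_2])
--
--     for j in range(q):
--         score_total_1 = accumulations[r_id_nums[j]][0] - accumulations[l_id_nums[j]][0]
--         score_total_2 = accumulations[r_id_nums[j]][1] - accumulations[l_id_nums[j]][1]
--         score_totals.append([score_total_1, score_total_2])
--     return score_totals
-- ===== SOURCE B (Python) =====
-- def get_score_totals(n: int, classes_and_scores: list, q: int, id_nums: list) -> list:
--     score_totals = []
--     for j in range(q):
--         l = id_nums[j][0] - 1
--         r = id_nums[j][1]
--         r1 = r2 = 0
--         for i in range(r):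
--             if classes_and_scores[i][0] == 1:
--                 r1 += classes_and_scores[i][1]
--             else:
--                 r2 += classes_and_scores[i][1]
--         l1 = l2 = 0
--         for i in range(l):
--             if classes_and_scores[i][0] == 1:
--                 l1 += classes_and_scores[i][1]
--             else:
--                 l2 += classes_and_scores[i][1]
--         score_totals.append([r1 - l1, r2 - l2])
--     return score_totals
-- ===== Notes on version B (the rewrite author's own statement) =====
-- stated objective: simpler
-- what changed: Drops the shared precomputed prefix-sum table: each query recomputes the two class totals up to r and up to l-1 by direct scans of classes_and_scores and subtracts them, so no table is built or indexed.
-- outside the precondition, e.g. on get_score_totals(1, [[1, 5]], 1, [[0, 1]]): A returns [[0, 0]], B returns [[5, 0]]; on get_score_totals(2, [[1, 3], [1, 4]], 1, [[1, -1]]): A returns [[7, 0]], B returns [[0, 0]]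
import Mathlib
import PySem

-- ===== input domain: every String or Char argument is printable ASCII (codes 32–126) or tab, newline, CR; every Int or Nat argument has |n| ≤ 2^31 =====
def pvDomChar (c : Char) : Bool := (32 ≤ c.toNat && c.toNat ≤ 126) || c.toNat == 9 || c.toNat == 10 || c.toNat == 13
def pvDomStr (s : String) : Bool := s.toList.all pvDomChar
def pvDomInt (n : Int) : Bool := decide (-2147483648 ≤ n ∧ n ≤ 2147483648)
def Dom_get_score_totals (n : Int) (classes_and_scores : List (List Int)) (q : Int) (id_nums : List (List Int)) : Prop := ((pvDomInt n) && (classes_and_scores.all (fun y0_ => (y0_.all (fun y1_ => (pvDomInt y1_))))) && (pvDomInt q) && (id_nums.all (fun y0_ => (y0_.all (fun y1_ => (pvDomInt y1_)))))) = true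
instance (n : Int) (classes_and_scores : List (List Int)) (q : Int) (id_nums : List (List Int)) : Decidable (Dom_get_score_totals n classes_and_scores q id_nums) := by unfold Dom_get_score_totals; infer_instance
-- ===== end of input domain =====

-- B replaces A's precomputed prefix-sum table by a direct per-query scan of the index range (simpler; return values only).

-- ===== PORT A =====
-- Literal port of A: build l/r index lists and class/score lists, fold up the
-- prefix-sum table `accumulations`, then answer each query by table differences.
-- Indexing uses PySem.List.pyGetD; Pre_ guarantees every access is in range.
def get_score_totals (n : Int) (classes_and_scores : List (List Int)) (q : Int) (id_nums : List (List Int)) : List (List Int) :=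
  let l_id_nums := id_nums.map (fun a => PySem.List.pyGetD a 0 0 - 1)
  let r_id_nums := id_nums.map (fun b => PySem.List.pyGetD b 1 0)
  let classes := classes_and_scores.map (fun c => PySem.List.pyGetD c 0 0)
  let scores := classes_and_scores.map (fun d => PySem.List.pyGetD d 1 0)
  let st := (PySem.List.pyRange 0 n 1).foldl
    (fun (st : List (List Int) × Int × Int) i =>
      let st' :=
        if PySem.List.pyGetD classes i 0 = 1 then
          (st.1, st.2.1 + PySem.List.pyGetD scores i 0, st.2.2)
        else
          (st.1, st.2.1, st.2.2 + PySem.List.pyGetD scores i 0)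
      (st'.1 ++ [[st'.2.1, st'.2.2]], st'.2.1, st'.2.2))
    ([[0, 0]], 0, 0)
  (PySem.List.pyRange 0 q 1).foldl
    (fun score_totals j =>
      let score_total_1 :=
        PySem.List.pyGetD (PySem.List.pyGetD st.1 (PySem.List.pyGetD r_id_nums j 0) []) 0 0
          - PySem.List.pyGetD (PySem.List.pyGetD st.1 (PySem.List.pyGetD l_id_nums j 0) []) 0 0
      let score_total_2 :=
        PySem.List.pyGetD (PySem.List.pyGetD st.1 (PySem.List.pyGetD r_id_nums j 0) []) 1 0
          - PySem.List.pyGetD (PySem.List.pyGetD st.1 (PySem.List.pyGetD l_id_nums j 0) []) 1 0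
      score_totals ++ [[score_total_1, score_total_2]])
    []

-- ===== PORT B =====
-- Literal port of B: no table; each query folds over its own range l..r-1.
def get_score_totals_alt (n : Int) (classes_and_scores : List (List Int)) (q : Int) (id_nums : List (List Int)) : List (List Int) :=
  (PySem.List.pyRange 0 q 1).foldl
    (fun score_totals j =>
      let l := PySem.List.pyGetD (PySem.List.pyGetD id_nums j []) 0 0 - 1
      let r := PySem.List.pyGetD (PySem.List.pyGetD id_nums j []) 1 0
      let tr := (PySem.List.pyRange 0 r 1).foldl
        (fun (t : Int × Int) i =>
          if PySem.List.pyGetD (PySem.List.pyGetD classes_and_scores i []) 0 0 = 1 then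
            (t.1 + PySem.List.pyGetD (PySem.List.pyGetD classes_and_scores i []) 1 0, t.2)
          else
            (t.1, t.2 + PySem.List.pyGetD (PySem.List.pyGetD classes_and_scores i []) 1 0))
        (0, 0)
      let tl := (PySem.List.pyRange 0 l 1).foldl
        (fun (t : Int × Int) i =>
          if PySem.List.pyGetD (PySem.List.pyGetD classes_and_scores i []) 0 0 = 1 then
            (t.1 + PySem.List.pyGetD (PySem.List.pyGetD classes_and_scores i []) 1 0, t.2)
          else
            (t.1, t.2 + PySem.List.pyGetD (PySem.List.pyGetD classes_and_scores i []) 1 0))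
        (0, 0)
      score_totals ++ [[tr.1 - tl.1, tr.2 - tl.2]])
    []

-- ===== PRECONDITION & SPEC =====
-- Pre_ excludes queries whose l/r indices into the prefix table are neither valid
-- positions (0..len of the table's prefix range) nor the exact full negative wrap
-- -(table length) nor a pair of equal indices — outside that, A's negative-index
-- wraparound into the table is an accident of the representation and B's direct
-- scans yield a different accidental value; it also excludes the inputs on which A
-- raises (n or q beyond the list lengths, short rows, indices past the table).
def Pre_get_score_totals (n : Int) (classes_and_scores : List (List Int)) (q : Int) (id_nums : List (List Int)) : Prop :=
  n ≤ (classes_and_scores.length : Int) ∧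
  q ≤ (id_nums.length : Int) ∧
  (∀ row ∈ classes_and_scores, 2 ≤ row.length) ∧
  (∀ row ∈ id_nums, 2 ≤ row.length) ∧
  (∀ row ∈ id_nums.take q.toNat,
     (((0 ≤ row.getD 0 0 - 1 ∧ row.getD 0 0 - 1 ≤ ((n.toNat : Int))) ∨
         row.getD 0 0 - 1 = -((n.toNat : Int) + 1)) ∧
      ((0 ≤ row.getD 1 0 ∧ row.getD 1 0 ≤ ((n.toNat : Int))) ∨
         row.getD 1 0 = -((n.toNat : Int) + 1))) ∨
     (row.getD 0 0 - 1 = row.getD 1 0 ∧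
        -((n.toNat : Int) + 1) ≤ row.getD 1 0 ∧ row.getD 1 0 ≤ ((n.toNat : Int))))
instance (n : Int) (classes_and_scores : List (List Int)) (q : Int) (id_nums : List (List Int)) : Decidable (Pre_get_score_totals n classes_and_scores q id_nums) := by unfold Pre_get_score_totals; infer_instance

def pvWitness_get_score_totals : Int × List (List Int) × Int × List (List Int) :=
  (3, [[1, 5], [2, 7], [1, -2]], 2, [[1, 3], [2, 2]])

def Spec_get_score_totals (n : Int) (classes_and_scores : List (List Int)) (q : Int) (id_nums : List (List Int)) (out : List (List Int)) : Prop := out = get_score_totals_alt n classes_and_scores q id_nums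
instance (n : Int) (classes_and_scores : List (List Int)) (q : Int) (id_nums : List (List Int)) (out : List (List Int)) : Decidable (Spec_get_score_totals n classes_and_scores q id_nums out) := by unfold Spec_get_score_totals; infer_instance

-- ===== CLAIM (what is proved, stated in full; the proofs are below) =====
def Claim_equal_get_score_totals : Prop := ∀ (n : Int) (classes_and_scores : List (List Int)) (q : Int) (id_nums : List (List Int)), Dom_get_score_totals n classes_and_scores q id_nums → Pre_get_score_totals n classes_and_scores q id_nums → Spec_get_score_totals n classes_and_scores q id_nums (get_score_totals n classes_and_scores q id_nums)

-- ===== LEMMAS AND PROOFS =====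

-- The (class-1, class-2) contribution of row i (B's way of reading the row).
def pvAdd (cs : List (List Int)) (i : Int) : Int × Int :=
  if PySem.List.pyGetD (PySem.List.pyGetD cs i []) 0 0 = 1 then
    (PySem.List.pyGetD (PySem.List.pyGetD cs i []) 1 0, 0)
  else
    (0, PySem.List.pyGetD (PySem.List.pyGetD cs i []) 1 0)

-- Componentwise sums of contributions over the index range [a, b).
def pvS1 (cs : List (List Int)) (a b : Int) : Int :=
  ((PySem.List.pyRange a b 1).map (fun i => (pvAdd cs i).1)).sum
def pvS2 (cs : List (List Int)) (a b : Int) : Int :=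
  ((PySem.List.pyRange a b 1).map (fun i => (pvAdd cs i).2)).sum

-- A pairwise-additive fold is the pair of sums.
theorem pv_foldl_pair_add (h : Int → Int × Int) (xs : List Int) (t : Int × Int) :
    xs.foldl (fun t i => (t.1 + (h i).1, t.2 + (h i).2)) t
      = (t.1 + (xs.map (fun i => (h i).1)).sum, t.2 + (xs.map (fun i => (h i).2)).sum) := by
  induction xs generalizing t with
  | nil => simp
  | cons x xs ih => simp [ih]; constructor <;> ring

-- B's inner scan over [l, r) computes the component sums.
theorem pv_inner_scan (cs : List (List Int)) (l r : Int) :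
    (PySem.List.pyRange l r 1).foldl
        (fun (t : Int × Int) i =>
          if PySem.List.pyGetD (PySem.List.pyGetD cs i []) 0 0 = 1 then
            (t.1 + PySem.List.pyGetD (PySem.List.pyGetD cs i []) 1 0, t.2)
          else
            (t.1, t.2 + PySem.List.pyGetD (PySem.List.pyGetD cs i []) 1 0))
        (0, 0)
      = (pvS1 cs l r, pvS2 cs l r) := by
  have hstep : (fun (t : Int × Int) i =>
      if PySem.List.pyGetD (PySem.List.pyGetD cs i []) 0 0 = 1 then
        (t.1 + PySem.List.pyGetD (PySem.List.pyGetD cs i []) 1 0, t.2)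
      else
        (t.1, t.2 + PySem.List.pyGetD (PySem.List.pyGetD cs i []) 1 0))
      = (fun (t : Int × Int) i => (t.1 + (pvAdd cs i).1, t.2 + (pvAdd cs i).2)) := by
    funext t i
    by_cases hc : PySem.List.pyGetD (PySem.List.pyGetD cs i []) 0 0 = 1 <;>
      simp [pvAdd, hc]
  rw [hstep, pv_foldl_pair_add]
  simp [pvS1, pvS2]

-- A's accumulation fold: the table lists the prefix sums [S1(0,k), S2(0,k)] for
-- k = 0..m, and the running pair is the prefix sum at m; m ≤ |cs| makes A's
-- map-then-index reads agree with pvAdd's row reads.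
theorem pv_acc_fold (cs : List (List Int))
    (m : Nat) (hm : m ≤ cs.length) :
    ((List.range m).map (fun (k : Nat) => (k : Int))).foldl
        (fun (st : List (List Int) × Int × Int) i =>
          let st' :=
            if PySem.List.pyGetD (cs.map (fun c => PySem.List.pyGetD c 0 0)) i 0 = 1 then
              (st.1, st.2.1 + PySem.List.pyGetD (cs.map (fun d => PySem.List.pyGetD d 1 0)) i 0, st.2.2)
            else
              (st.1, st.2.1, st.2.2 + PySem.List.pyGetD (cs.map (fun d => PySem.List.pyGetD d 1 0)) i 0)
          (st'.1 ++ [[st'.2.1, st'.2.2]], st'.2.1, st'.2.2))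
        ([[0, 0]], 0, 0)
      = (((List.range (m + 1)).map (fun (k : Nat) => (k : Int))).map (fun k => [pvS1 cs 0 k, pvS2 cs 0 k]),
         pvS1 cs 0 (m : Int), pvS2 cs 0 (m : Int)) := by
  induction m with
  | zero => simp [pvS1, pvS2, PySem.List.pyRange_one_eq_nil]
  | succ m ih =>
    have hm' : m ≤ cs.length := Nat.le_of_succ_le hm
    have hmlt : m < cs.length := hm
    rw [List.range_succ, List.map_append, List.foldl_append, ih hm']
    have hget0 : PySem.List.pyGetD (cs.map (fun c => PySem.List.pyGetD c 0 0)) ((m : Int)) 0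
        = PySem.List.pyGetD (PySem.List.pyGetD cs ((m : Int)) []) 0 0 := by
      simp [List.getD_eq_getElem?_getD, hmlt]
    have hget1 : PySem.List.pyGetD (cs.map (fun d => PySem.List.pyGetD d 1 0)) ((m : Int)) 0
        = PySem.List.pyGetD (PySem.List.pyGetD cs ((m : Int)) []) 1 0 := by
      simp [List.getD_eq_getElem?_getD, hmlt]
    have hnn : (0 : Int) ≤ (m : Int) := by positivity
    have hS1 : pvS1 cs 0 (((m + 1 : Nat) : Int)) = pvS1 cs 0 (m : Int) + (pvAdd cs (m : Int)).1 := by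
      unfold pvS1
      have h : (((m + 1 : Nat) : Int)) = ((m : Int)) + 1 := by push_cast; ring
      rw [h, PySem.List.pyRange_one_succ_right hnn]
      simp
    have hS2 : pvS2 cs 0 (((m + 1 : Nat) : Int)) = pvS2 cs 0 (m : Int) + (pvAdd cs (m : Int)).2 := by
      unfold pvS2
      have h : (((m + 1 : Nat) : Int)) = ((m : Int)) + 1 := by push_cast; ring
      rw [h, PySem.List.pyRange_one_succ_right hnn]
      simp
    rw [List.range_succ (n := m + 1), List.map_append, List.map_append]
    simp only [List.foldl_cons, List.foldl_nil, hget0, hget1, List.map_cons, List.map_nil, hS1, hS2]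
    unfold pvAdd
    by_cases hc : PySem.List.pyGetD (PySem.List.pyGetD cs ((m : Int)) []) 0 0 = 1
    · rw [if_pos hc, if_pos hc]
      simp
    · rw [if_neg hc, if_neg hc]
      simp

-- ===== VERDICT (by name: the statement is the Claim_ definition above) =====
theorem get_score_totals_spec : Claim_equal_get_score_totals := by
  intro n cs q ids _hdom hpre
  obtain ⟨hnlen, hqlen, hcsrow, hidrow, hquery⟩ := hpre
  unfold Spec_get_score_totals get_score_totals get_score_totals_alt
  dsimp only
  have hrange : PySem.List.pyRange 0 n 1 = (List.range n.toNat).map (fun (k : Nat) => (k : Int)) := by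
    rw [PySem.List.pyRange_one]
    simp
  rw [hrange, pv_acc_fold cs n.toNat (by omega)]
  rw [PySem.List.foldl_append_singleton_eq_map, PySem.List.foldl_append_singleton_eq_map]
  simp only [List.nil_append]
  apply List.map_congr_left
  intro j hj
  rw [PySem.List.mem_pyRange_one] at hj
  obtain ⟨hj0, hjq⟩ := hj
  have hjlen : j.toNat < ids.length := by omega
  -- the j-th query row and its bounds
  have hrowmem : ids[j.toNat] ∈ ids.take q.toNat := by
    have h1 : (ids.take q.toNat)[j.toNat]'(by simp; omega) = ids[j.toNat] := List.getElem_take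
    exact h1 ▸ List.getElem_mem _
  have hq := hquery _ hrowmem
  have hrowlen := hidrow _ (List.getElem_mem hjlen)
  have hjInt : j < ((ids.length : Nat) : Int) := by omega
  have hrowget : PySem.List.pyGetD ids j [] = ids[j.toNat] :=
    PySem.List.pyGetD_eq_getElem ids [] hj0 hjInt
  -- A's per-query reads of the l/r index lists
  have hl : PySem.List.pyGetD (ids.map (fun a => PySem.List.pyGetD a 0 0 - 1)) j 0
      = PySem.List.pyGetD (PySem.List.pyGetD ids j []) 0 0 - 1 := by
    rw [PySem.List.pyGetD_eq_getElem (ids.map (fun a => PySem.List.pyGetD a 0 0 - 1)) 0 hj0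
          (by simpa using hjInt),
        List.getElem_map, hrowget]
  have hr : PySem.List.pyGetD (ids.map (fun b => PySem.List.pyGetD b 1 0)) j 0
      = PySem.List.pyGetD (PySem.List.pyGetD ids j []) 1 0 := by
    rw [PySem.List.pyGetD_eq_getElem (ids.map (fun b => PySem.List.pyGetD b 1 0)) 0 hj0
          (by simpa using hjInt),
        List.getElem_map, hrowget]
  rw [hl, hr]
  set l : Int := PySem.List.pyGetD (PySem.List.pyGetD ids j []) 0 0 - 1 with hldef
  set r : Int := PySem.List.pyGetD (PySem.List.pyGetD ids j []) 1 0 with hrdef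
  have hget0 : PySem.List.pyGetD (PySem.List.pyGetD ids j []) 0 0 = ids[j.toNat].getD 0 0 := by
    rw [hrowget, PySem.List.pyGetD_zero]
  have hget1 : PySem.List.pyGetD (PySem.List.pyGetD ids j []) 1 0 = ids[j.toNat].getD 1 0 := by
    rw [hrowget, PySem.List.pyGetD_eq_getElem (ids[j.toNat]) 0 (by norm_num) (by omega)]
    simp [List.getD_eq_getElem?_getD, List.getElem?_eq_getElem
      (show 1 < ids[j.toNat].length by omega)]
  rcases hq with ⟨hla, hra⟩ | ⟨hab, -, -⟩
  -- main case: each index is a valid table position or the exact full wrap,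
  -- and either way the table lookup IS the corresponding direct-scan pair
  · have hL : (0 ≤ l ∧ l ≤ ((n.toNat : Int))) ∨ l = -((n.toNat : Int) + 1) := by
      rw [hldef, hget0]; exact hla
    have hR : (0 ≤ r ∧ r ≤ ((n.toNat : Int))) ∨ r = -((n.toNat : Int) + 1) := by
      rw [hrdef, hget1]; exact hra
    have hlookup : ∀ k : Int, ((0 ≤ k ∧ k ≤ ((n.toNat : Int))) ∨ k = -((n.toNat : Int) + 1)) →
        PySem.List.pyGetD
            (((List.range (n.toNat + 1)).map (fun (k : Nat) => (k : Int))).map (fun k => [pvS1 cs 0 k, pvS2 cs 0 k])) k []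
          = [pvS1 cs 0 k, pvS2 cs 0 k] := by
      intro k hk
      rcases hk with ⟨hk0, hkn⟩ | hkw
      · have hklt : k < ((((List.range (n.toNat + 1)).map (fun (k : Nat) => (k : Int))).map
            (fun k => [pvS1 cs 0 k, pvS2 cs 0 k])).length : Int) := by
          simp; omega
        rw [PySem.List.pyGetD_eq_getElem _ [] hk0 hklt, List.getElem_map, List.getElem_map,
            List.getElem_range, show ((k.toNat : Int)) = k by omega]
      · -- full wrap: the lookup lands on index 0, whose entry is [0, 0],
        -- and the scan range at a negative bound is empty as well
        rw [hkw, show -((n.toNat : Int) + 1) = -(((n.toNat + 1 : Nat) : Int)) by push_cast; ring]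
        rw [PySem.List.pyGetD_neg_natCast _ (n.toNat + 1) [] (by omega) (by simp)]
        simp [pvS1, pvS2, PySem.List.pyRange_one_eq_nil]
    rw [hlookup r hR, hlookup l hL]
    rw [pv_inner_scan, pv_inner_scan]
    simp [PySem.List.pyGetD]
  -- degenerate query a - 1 = b: both sides subtract identical values, giving [0, 0]
  · have hlr : l = r := by rw [hldef, hrdef, hget0, hget1]; omega
    rw [hlr]
    simp
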